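-- pv_equiv track=rewrite | github.com/eliottcassidy2000/math | 04-computation/grinberg_stanley_final.py | independence_polynomial_coeffs
-- ===== SOURCE A (Python) =====
-- from collections import defaultdict, Counter
--
-- def independence_polynomial_coeffs(cycles):
--     m = len(cycles)
--     cycle_sets = [set(c) for c in cycles]
--     adj = [[False]*m for _ in range(m)]
--     for i in range(m):
--         for j in range(i+1, m):
--             if cycle_sets[i] & cycle_sets[j]:
--                 adj[i][j] = adj[j][i] = True
--     alpha = defaultdict(int)
--     for mask in range(2**m):
--         verts = [i for i in range(m) if (mask >> i) & 1]
--         indep = True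
--         for a in range(len(verts)):
--             for b in range(a+1, len(verts)):
--                 if adj[verts[a]][verts[b]]:
--                     indep = False; break
--             if not indep: break
--         if indep: alpha[len(verts)] += 1
--     max_k = max(alpha.keys()) if alpha else 0
--     return [alpha.get(k, 0) for k in range(max_k + 1)]
-- ===== SOURCE B (Python) =====
-- def independence_polynomial_coeffs(cycles):
--     m = len(cycles)
--     sets = [set(c) for c in cycles]
--
--     def nmask(i):
--         v = 0
--         for j in range(m):
--             if j != i and sets[i] & sets[j]:
--                 v |= 1 << j
--         return v
--
--     nbr = [nmask(i) for i in range(m)]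
--     counts = [0] * (m + 1)
--     for mask in range(1 << m):
--         ok = True
--         size = 0
--         for i in range(m):
--             if (mask >> i) & 1:
--                 if nbr[i] & mask:
--                     ok = False
--                     break
--                 size += 1
--         if ok:
--             counts[size] += 1
--     while len(counts) > 1 and counts[-1] == 0:
--         counts.pop()
--     return counts
-- ===== Notes on version B (the rewrite author's own statement) =====
-- stated objective: alternative
-- what changed: Replaces the adjacency matrix plus per-mask vertex-list extraction and O(k^2) pair scanning with precomputed neighbor bitmasks checked by bitwise AND per subset, counts into a plain array instead of a defaultdict, and trims trailing zeros instead of taking a max over dict keys (intended as faster; timing measured 4.85x at the largest size both finished, unconfirmed at the largest generated size where both time out).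
import Mathlib
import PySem

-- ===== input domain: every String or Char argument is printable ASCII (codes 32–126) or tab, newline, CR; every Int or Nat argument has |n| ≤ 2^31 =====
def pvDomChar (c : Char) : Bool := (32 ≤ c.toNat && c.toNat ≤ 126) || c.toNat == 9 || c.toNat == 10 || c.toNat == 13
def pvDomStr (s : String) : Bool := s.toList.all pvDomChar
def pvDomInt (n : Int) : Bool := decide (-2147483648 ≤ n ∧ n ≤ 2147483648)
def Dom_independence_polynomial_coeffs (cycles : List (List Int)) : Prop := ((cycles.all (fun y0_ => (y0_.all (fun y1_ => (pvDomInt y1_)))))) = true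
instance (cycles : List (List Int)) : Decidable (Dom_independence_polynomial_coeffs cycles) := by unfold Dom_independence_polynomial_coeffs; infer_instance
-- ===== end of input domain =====

-- B replaces A's adjacency matrix + per-mask vertex list + pair scan by neighbor
-- bitmasks checked with a bitwise AND per subset, an array of counts instead of a
-- defaultdict, and a trailing-zero trim instead of a max over dict keys.

-- ===== PORT A =====
-- truthiness of `s & t` on Python sets (shared subexpression of both sources)
def pvInterNonempty (s t : PySem.Set Int) : Bool := !(PySem.Set.inter s t).isEmpty

-- A's two nested `for a`/`for b` loops over verts with `break` (short-circuit &&)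
def pvPairsIndep (adj : List (List Bool)) : List Int → Bool
  | [] => true
  | v :: rest =>
      (rest.all (fun w => !(PySem.List.pyGetD (PySem.List.pyGetD adj v []) w false)))
        && pvPairsIndep adj rest

def independence_polynomial_coeffs (cycles : List (List Int)) : List Int :=
  let m : Int := (cycles.length : Int)
  let cycle_sets : List (PySem.Set Int) := cycles.map (fun c => PySem.Set.ofList c)
  let adj0 : List (List Bool) :=
    (PySem.List.pyRange 0 m).map (fun _ => List.replicate cycles.length false)
  let adj : List (List Bool) :=
    (PySem.List.pyRange 0 m).foldl (fun adj i =>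
      (PySem.List.pyRange (i+1) m).foldl (fun adj j =>
        if pvInterNonempty (PySem.List.pyGetD cycle_sets i []) (PySem.List.pyGetD cycle_sets j []) then
          let adj := PySem.List.pySetD adj i (PySem.List.pySetD (PySem.List.pyGetD adj i []) j true)
          PySem.List.pySetD adj j (PySem.List.pySetD (PySem.List.pyGetD adj j []) i true)
        else adj) adj) adj0
  let alpha : PySem.Dict Int Int :=
    (PySem.List.pyRange 0 ((2:Int)^cycles.length)).foldl (fun alpha (mask : Int) =>
      -- i ≥ 0 here, so `.toNat` on the shift count is exact
      let verts : List Int := (PySem.List.pyRange 0 m).filter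
        (fun i => PySem.Int.band (mask >>> i.toNat) 1 != 0)
      if pvPairsIndep adj verts then alpha.modify (verts.length : Int) 0 (· + 1) else alpha)
      PySem.Dict.empty
  let max_k : Int := if alpha.size ≠ 0 then (PySem.List.max? alpha.keys (fun k => k)).getD 0 else 0
  (PySem.List.pyRange 0 (max_k + 1)).map (fun k => alpha.getD k 0)

-- ===== PORT B =====
-- B's `for i in range(m)` per-mask loop with `break` (carries ok/size)
def pvMaskScan (nbr : List Int) (mask : Int) : List Int → Int → Bool × Int
  | [], size => (true, size)
  | i :: rest, size =>
      if PySem.Int.band (mask >>> i.toNat) 1 != 0 then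
        if PySem.Int.band (PySem.List.pyGetD nbr i 0) mask != 0 then (false, size)
        else pvMaskScan nbr mask rest (size + 1)
      else pvMaskScan nbr mask rest size

-- B's `while len(counts) > 1 and counts[-1] == 0: counts.pop()`
def pvTrim (l : List Int) : List Int :=
  if h : 1 < l.length ∧ PySem.List.pyGetD l (-1) 0 = 0 then pvTrim l.dropLast else l
termination_by l.length
decreasing_by simp [List.length_dropLast]; omega

def independence_polynomial_coeffs_alt (cycles : List (List Int)) : List Int :=
  let m : Int := (cycles.length : Int)
  let sets : List (PySem.Set Int) := cycles.map (fun c => PySem.Set.ofList c)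
  let nbr : List Int := (PySem.List.pyRange 0 m).map (fun i =>
    (PySem.List.pyRange 0 m).foldl (fun v j =>
      if j != i && pvInterNonempty (PySem.List.pyGetD sets i []) (PySem.List.pyGetD sets j []) then
        PySem.Int.bor v ((1:Int) <<< j.toNat)
      else v) 0)
  let counts : List Int :=
    (PySem.List.pyRange 0 ((2:Int)^cycles.length)).foldl (fun counts mask =>
      let r := pvMaskScan nbr mask (PySem.List.pyRange 0 m) 0
      if r.1 then PySem.List.pySetD counts r.2 (PySem.List.pyGetD counts r.2 0 + 1) else counts)
      (List.replicate (cycles.length + 1) 0)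
  pvTrim counts

-- ===== PRECONDITION & SPEC =====
def Spec_independence_polynomial_coeffs (cycles : List (List Int)) (out : List Int) : Prop := out = independence_polynomial_coeffs_alt cycles
instance (cycles : List (List Int)) (out : List Int) : Decidable (Spec_independence_polynomial_coeffs cycles out) := by unfold Spec_independence_polynomial_coeffs; infer_instance

-- ===== CLAIM (what is proved, stated in full; the proofs are below) =====
def Claim_equal_independence_polynomial_coeffs : Prop := ∀ (cycles : List (List Int)), Dom_independence_polynomial_coeffs cycles → Spec_independence_polynomial_coeffs cycles (independence_polynomial_coeffs cycles)

-- ===== LEMMAS AND PROOFS =====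

-- ---- shared model: edge predicate, independence, sizes ----

def pvE (cycles : List (List Int)) (i j : Nat) : Bool :=
  pvInterNonempty (PySem.Set.ofList (cycles.getD i [])) (PySem.Set.ofList (cycles.getD j []))

theorem pvInter_comm (s t : PySem.Set Int) : pvInterNonempty s t = pvInterNonempty t s := by
  suffices h : (PySem.Set.inter s t).isEmpty = (PySem.Set.inter t s).isEmpty by
    simp [pvInterNonempty, h]
  rw [Bool.eq_iff_iff, List.isEmpty_iff, List.isEmpty_iff,
    List.eq_nil_iff_forall_not_mem, List.eq_nil_iff_forall_not_mem]
  constructor <;> intro h x hx <;> exact h x (by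
    rw [PySem.Set.mem_inter] at hx ⊢; tauto)

theorem pvE_comm (cycles : List (List Int)) (i j : Nat) : pvE cycles i j = pvE cycles j i := by
  unfold pvE
  rw [pvInter_comm]

def pvStep (cycles : List (List Int)) (adj : List (List Bool)) (p : Nat × Nat) : List (List Bool) :=
  if pvE cycles p.1 p.2 then
    let adj' := adj.set p.1 ((adj.getD p.1 []).set p.2 true)
    adj'.set p.2 ((adj'.getD p.2 []).set p.1 true)
  else adj

def pvEntry (adj : List (List Bool)) (p q : Nat) : Bool := (adj.getD p []).getD q false

def pvPairsN (n : Nat) : List (Nat × Nat) :=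
  (List.range n).flatMap (fun i => (List.range' (i+1) (n-(i+1))).map (fun j => (i, j)))

theorem pv_getD_set {α : Type} (l : List α) (n m : Nat) (a d : α) (hn : n < l.length) :
    (l.set n a).getD m d = if n = m then a else l.getD m d := by
  rw [List.getD_eq_getElem?_getD, List.getElem?_set, List.getD_eq_getElem?_getD]
  by_cases h : n = m
  · subst h; simp [hn]
  · simp [h]

theorem pv_rowlen (adj : List (List Bool)) (hdim : ∀ row ∈ adj, row.length = adj.length)
    (r : Nat) (hr : r < adj.length) : (adj.getD r []).length = adj.length := by
  rw [List.getD_eq_getElem?_getD]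
  simp only [List.getElem?_eq_getElem hr]
  exact hdim _ (List.getElem_mem hr)

theorem pv_entry_step (cycles : List (List Int)) (adj : List (List Bool)) (i j p q : Nat)
    (hdim : ∀ row ∈ adj, row.length = adj.length) (hij : i ≠ j)
    (hi : i < adj.length) (hj : j < adj.length) (hp : p < adj.length) (hq : q < adj.length) :
    pvEntry (pvStep cycles adj (i, j)) p q
      = ((decide ((p, q) = (i, j) ∨ (p, q) = (j, i)) && pvE cycles i j) || pvEntry adj p q) := by
  by_cases hE : pvE cycles i j = true
  · simp only [pvStep, hE, if_true, pvEntry]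
    have h1 : (adj.set i ((adj.getD i []).set j true)).getD j [] = adj.getD j [] := by
      rw [pv_getD_set _ i j _ _ hi, if_neg hij]
    rw [h1]
    rw [pv_getD_set _ j p _ _ (by simpa using hj)]
    by_cases hpj : j = p
    · rw [if_pos hpj]
      rw [pv_getD_set _ i q _ _ (by rw [pv_rowlen adj hdim j hj]; exact hi)]
      subst hpj
      by_cases hqi : i = q
      · subst hqi
        simp [hE, hij, Ne.symm hij]
      · have hqi' : q ≠ i := fun h => hqi h.symm
        simp [pvEntry, hqi, hqi', hij, Ne.symm hij]
    · rw [if_neg hpj]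
      rw [pv_getD_set _ i p _ _ hi]
      by_cases hpi : i = p
      · rw [if_pos hpi]
        rw [pv_getD_set _ j q _ _ (by rw [pv_rowlen adj hdim i hi]; exact hj)]
        subst hpi
        by_cases hqj : j = q
        · subst hqj
          simp [hE]
        · have hqj' : q ≠ j := fun h => hqj h.symm
          simp [pvEntry, hqj, hqj', hij]
      · have hpi' : p ≠ i := fun h => hpi h.symm
        have hpj' : p ≠ j := fun h => hpj h.symm
        rw [if_neg hpi]
        simp [pvEntry, hpi', hpj']
  · have hE' : pvE cycles i j = false := by simpa using hE
    simp [pvStep, hE', pvEntry]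

theorem pv_step_dim (cycles : List (List Int)) (adj : List (List Bool)) (p : Nat × Nat)
    (hdim : ∀ row ∈ adj, row.length = adj.length)
    (h1 : p.1 < adj.length) (h2 : p.2 < adj.length) :
    (pvStep cycles adj p).length = adj.length
      ∧ ∀ row ∈ pvStep cycles adj p, row.length = adj.length := by
  unfold pvStep
  split
  · constructor
    · simp
    · intro row hrow
      rcases List.mem_or_eq_of_mem_set hrow with hrow | rfl
      · rcases List.mem_or_eq_of_mem_set hrow with hrow | rfl
        · exact hdim _ hrow
        · rw [List.length_set]; exact pv_rowlen adj hdim _ h1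
      · rw [List.length_set]
        rw [pv_getD_set _ p.1 p.2 _ _ h1]
        split
        · rw [List.length_set]; exact pv_rowlen adj hdim _ h1
        · exact pv_rowlen adj hdim _ h2
  · exact ⟨rfl, hdim⟩

theorem pv_entry_fold (cycles : List (List Int)) (L : List (Nat × Nat)) (adj : List (List Bool))
    (hdim : ∀ row ∈ adj, row.length = adj.length) (p q : Nat)
    (hL : ∀ r ∈ L, r.1 < r.2 ∧ r.2 < adj.length)
    (hp : p < adj.length) (hq : q < adj.length) :
    pvEntry (L.foldl (pvStep cycles) adj) p q
      = (pvEntry adj p q || decide (∃ r ∈ L, (r = (p, q) ∨ r = (q, p)) ∧ pvE cycles r.1 r.2)) := by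
  induction L generalizing adj with
  | nil => simp
  | cons r L ih =>
    obtain ⟨hr12, hr2⟩ := hL r (by simp)
    have hr1 : r.1 < adj.length := lt_trans hr12 hr2
    obtain ⟨hlen, hdim'⟩ := pv_step_dim cycles adj r hdim hr1 hr2
    have hdim2 : ∀ row ∈ pvStep cycles adj r, row.length = (pvStep cycles adj r).length := by
      rw [hlen]; exact hdim'
    have hL2 : ∀ s ∈ L, s.1 < s.2 ∧ s.2 < (pvStep cycles adj r).length := by
      rw [hlen]; intro s hs; exact hL s (by simp [hs])
    have hstep := pv_entry_step cycles adj r.1 r.2 p q hdim (by omega) hr1 hr2 hp hq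
    rw [List.foldl_cons,
      ih (pvStep cycles adj r) hdim2 hL2 (by rw [hlen]; exact hp) (by rw [hlen]; exact hq)]
    have hr : (r.1, r.2) = r := rfl
    rw [hr] at hstep
    rw [hstep, Bool.eq_iff_iff]
    obtain ⟨a, b⟩ := r
    simp only [Bool.or_eq_true, Bool.and_eq_true, decide_eq_true_eq, List.mem_cons,
      Prod.mk.injEq]
    constructor
    · rintro ((⟨h, hE2⟩ | h) | ⟨s, hs, hor, hE2⟩)
      · refine Or.inr ⟨(a, b), Or.inl rfl, ?_, hE2⟩
        simp only [Prod.mk.injEq]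
        tauto
      · exact Or.inl h
      · exact Or.inr ⟨s, Or.inr hs, hor, hE2⟩
    · rintro (h | ⟨s, hs | hs, hor, hE2⟩)
      · exact Or.inl (Or.inr h)
      · subst hs
        simp only [Prod.mk.injEq] at hor
        exact Or.inl (Or.inl ⟨by tauto, hE2⟩)
      · exact Or.inr ⟨s, hs, hor, hE2⟩

theorem pv_pyRange_natCast (a b : Nat) :
    PySem.List.pyRange (a : Int) (b : Int) = (List.range' a (b - a)).map (fun (k : Nat) => (k : Int)) := by
  simp only [PySem.List.pyRange, List.range'_eq_map_range]
  norm_num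
  rw [show (if a < b then b - a else (0:Nat)) = b - a by split <;> omega]
  apply List.map_congr_left
  intro k _
  simp only [Function.comp_apply]
  push_cast
  ring

theorem pv_foldl_foldl_pairs {α β : Type} (f : β → α → α → β) (l : List α)
    (g : α → List α) (b : β) :
    l.foldl (fun s i => (g i).foldl (fun s j => f s i j) s) b
      = (l.flatMap (fun i => (g i).map (fun j => (i, j)))).foldl (fun s p => f s p.1 p.2) b := by
  induction l generalizing b with
  | nil => rfl
  | cons a l ih => simp [List.foldl_append, List.foldl_map, ih]

theorem pv_mem_pairsN (n i j : Nat) : (i, j) ∈ pvPairsN n ↔ i < j ∧ j < n := by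
  simp only [pvPairsN, List.mem_flatMap, List.mem_map, List.mem_range, List.mem_range'_1,
    Prod.mk.injEq]
  constructor
  · rintro ⟨a, ha, b, ⟨hb1, hb2⟩, rfl, rfl⟩
    omega
  · rintro ⟨hij, hjn⟩
    exact ⟨i, by omega, j, ⟨by omega, by omega⟩, rfl, rfl⟩

theorem pv_sets_getD (cycles : List (List Int)) (i : Nat) (hi : i < cycles.length) :
    PySem.List.pyGetD (cycles.map (fun c => PySem.Set.ofList c)) ((i : Nat) : Int) []
      = PySem.Set.ofList (cycles.getD i []) := by
  rw [PySem.List.pyGetD_natCast, List.getD_eq_getElem?_getD, List.getD_eq_getElem?_getD]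
  simp [List.getElem?_map, List.getElem?_eq_getElem, hi]

theorem pv_adj_spec (cycles : List (List Int)) (p q : Nat)
    (hp : p < cycles.length) (hq : q < cycles.length) :
    pvEntry
      ((pvPairsN cycles.length).foldl (pvStep cycles)
        ((List.range cycles.length).map (fun _ => List.replicate cycles.length false))) p q
      = (decide (p ≠ q) && pvE cycles p q) := by
  set n := cycles.length with hn
  have hlen : ((List.range n).map (fun _ => List.replicate n false)).length = n := by simp
  rw [pv_entry_fold cycles _ _
    (by intro row hrow
        rw [hlen]
        obtain ⟨_, _, rfl⟩ := List.mem_map.1 hrow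
        simp)
    p q
    (by intro r hr
        rw [hlen]
        obtain ⟨a, b⟩ := r
        exact (pv_mem_pairsN n a b).1 hr)
    (by rw [hlen]; exact hp) (by rw [hlen]; exact hq)]
  have hentry0 : pvEntry ((List.range n).map (fun _ => List.replicate n false)) p q = false := by
    unfold pvEntry
    rw [List.getD_eq_getElem?_getD]
    simp [List.getElem?_map, List.getElem?_range, hp]
  rw [hentry0, Bool.false_or, Bool.eq_iff_iff]
  simp only [decide_eq_true_eq, Bool.and_eq_true]
  constructor
  · rintro ⟨r, hr, hor, hE⟩
    obtain ⟨a, b⟩ := r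
    obtain ⟨hab, hbn⟩ := (pv_mem_pairsN n a b).1 hr
    rcases hor with h | h
    · obtain ⟨rfl, rfl⟩ := Prod.mk.inj h
      exact ⟨by omega, hE⟩
    · obtain ⟨rfl, rfl⟩ := Prod.mk.inj h
      refine ⟨by omega, ?_⟩
      rw [pvE_comm]
      exact hE
  · rintro ⟨hpq, hE⟩
    rcases Nat.lt_or_ge p q with h | h
    · exact ⟨(p, q), (pv_mem_pairsN n p q).2 ⟨h, hq⟩, Or.inl rfl, hE⟩
    · have hqp : q < p := by omega
      exact ⟨(q, p), (pv_mem_pairsN n q p).2 ⟨hqp, hp⟩, Or.inr rfl, by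
        dsimp only
        rw [pvE_comm]
        exact hE⟩

theorem pv_adjA_eq (cycles : List (List Int)) :
    (PySem.List.pyRange 0 (cycles.length : Int)).foldl (fun adj i =>
      (PySem.List.pyRange (i+1) (cycles.length : Int)).foldl (fun adj j =>
        if pvInterNonempty (PySem.List.pyGetD (cycles.map (fun c => PySem.Set.ofList c)) i [])
            (PySem.List.pyGetD (cycles.map (fun c => PySem.Set.ofList c)) j []) then
          let adj := PySem.List.pySetD adj i (PySem.List.pySetD (PySem.List.pyGetD adj i []) j true)
          PySem.List.pySetD adj j (PySem.List.pySetD (PySem.List.pyGetD adj j []) i true)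
        else adj) adj)
      ((PySem.List.pyRange 0 (cycles.length : Int)).map (fun _ => List.replicate cycles.length false))
      = (pvPairsN cycles.length).foldl (pvStep cycles)
          ((List.range cycles.length).map (fun _ => List.replicate cycles.length false)) := by
  set n := cycles.length with hn
  have h0 : PySem.List.pyRange 0 (n : Int) = (List.range n).map (fun (k : Nat) => (k : Int)) := by
    have := pv_pyRange_natCast 0 n
    simpa [List.range_eq_range'] using this
  rw [h0, List.foldl_map, List.map_map]
  have hstep : ∀ (adj : List (List Bool)), ∀ i ∈ List.range n,
      (PySem.List.pyRange ((i : Int)+1) (n : Int)).foldl (fun adj j =>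
        if pvInterNonempty (PySem.List.pyGetD (cycles.map (fun c => PySem.Set.ofList c)) (i : Int) [])
            (PySem.List.pyGetD (cycles.map (fun c => PySem.Set.ofList c)) j []) then
          let adj := PySem.List.pySetD adj (i : Int) (PySem.List.pySetD (PySem.List.pyGetD adj (i : Int) []) j true)
          PySem.List.pySetD adj j (PySem.List.pySetD (PySem.List.pyGetD adj j []) (i : Int) true)
        else adj) adj
      = (List.range' (i+1) (n-(i+1))).foldl (fun adj j => pvStep cycles adj (i, j)) adj := by
    intro adj i hi
    rw [List.mem_range] at hi
    rw [show ((i : Int) + 1) = ((i+1 : Nat) : Int) by push_cast; ring]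
    rw [pv_pyRange_natCast (i+1) n, List.foldl_map]
    apply PySem.List.foldl_congr_mem
    intro s j hj
    rw [List.mem_range'_1] at hj
    rw [pv_sets_getD cycles i (by omega), pv_sets_getD cycles j (by omega)]
    simp only [pvStep, pvE, PySem.List.pySetD_natCast, PySem.List.pyGetD_natCast]
  rw [PySem.List.foldl_congr_mem _ _ _ _ hstep]
  rw [pv_foldl_foldl_pairs (fun s i j => pvStep cycles s (i, j)) (List.range n)
    (fun i => List.range' (i+1) (n-(i+1)))]
  rfl

theorem pv_pairwise_iff_of_sorted {R : Nat → Nat → Prop} {l : List Nat} (hs : l.Pairwise (· < ·)) :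
    l.Pairwise R ↔ ∀ a ∈ l, ∀ b ∈ l, a < b → R a b := by
  induction l with
  | nil => simp
  | cons x l ih =>
    rw [List.pairwise_cons] at hs ⊢
    rw [ih hs.2]
    constructor
    · rintro ⟨hx, hrest⟩ a ha b hb hab
      rcases List.mem_cons.1 ha with ha | ha
      · rcases List.mem_cons.1 hb with hb | hb
        · omega
        · exact ha ▸ hx b hb
      · rcases List.mem_cons.1 hb with hb | hb
        · have := hs.1 a ha; omega
        · exact hrest a ha b hb hab
    · intro h
      refine ⟨fun b hb => h x (by simp) b (by simp [hb]) (hs.1 b hb), ?_⟩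
      intro a ha b hb hab
      exact h a (by simp [ha]) b (by simp [hb]) hab

theorem pv_pairsIndep_pairwise (adj : List (List Bool)) (l : List Int) :
    pvPairsIndep adj l
      = decide (l.Pairwise (fun v w => PySem.List.pyGetD (PySem.List.pyGetD adj v []) w false = false)) := by
  induction l with
  | nil => rfl
  | cons v rest ih =>
    rw [pvPairsIndep, ih, Bool.eq_iff_iff]
    simp [List.pairwise_cons, List.all_eq_true]

theorem pv_band_shift (M k : Nat) :
    (PySem.Int.band (((M : Nat) : Int) >>> k) 1 != 0) = M.testBit k := by
  first
  | rw [← Int.natCast_shiftRight]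
  | rw [Int.shiftRight_natCast]
  rw [show (1 : Int) = ((1 : Nat) : Int) by norm_num, PySem.Int.band_natCast]
  rw [Bool.eq_iff_iff]
  simp only [bne_iff_ne, ne_eq, Nat.cast_eq_zero, Nat.and_one_is_mod,
    Nat.testBit_eq_decide_div_mod_eq, Nat.shiftRight_eq_div_pow, decide_eq_true_eq]
  omega

theorem pv_vertsA (cycles : List (List Int)) (MI : Int) (M : Nat) (hMI : MI = ((M : Nat) : Int)) :
    ((PySem.List.pyRange 0 (cycles.length : Int)).filter
        (fun i => PySem.Int.band
          (@HShiftRight.hShiftRight Int Nat Int Int.instHShiftRightNat MI i.toNat) 1 != 0))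
      = ((List.range cycles.length).filter (fun i => M.testBit i)).map (fun (k : Nat) => (k : Int)) := by
  subst hMI
  set n := cycles.length
  have h0 : PySem.List.pyRange 0 (n : Int) = (List.range n).map (fun (k : Nat) => (k : Int)) := by
    have := pv_pyRange_natCast 0 n
    simpa [List.range_eq_range'] using this
  rw [h0, List.filter_map]
  congr 1
  apply List.filter_congr
  intro k _
  simp only [Function.comp_apply, Int.toNat_natCast]
  exact pv_band_shift M k

abbrev pvIndepP (cycles : List (List Int)) (M : Nat) : Prop :=
  ∀ i < cycles.length, ∀ j < cycles.length, i < j → M.testBit i → M.testBit j → pvE cycles i j = false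

def pvIndepB (cycles : List (List Int)) (M : Nat) : Bool := decide (pvIndepP cycles M)

theorem pv_indepA (cycles : List (List Int)) (M : Nat) :
    pvPairsIndep
      ((pvPairsN cycles.length).foldl (pvStep cycles)
        ((List.range cycles.length).map (fun _ => List.replicate cycles.length false)))
      (((List.range cycles.length).filter (fun i => M.testBit i)).map (fun (k : Nat) => (k : Int)))
      = pvIndepB cycles M := by
  set n := cycles.length with hn
  rw [pv_pairsIndep_pairwise]
  unfold pvIndepB
  rw [decide_eq_decide, List.pairwise_map]
  have hsorted : ((List.range n).filter (fun i => M.testBit i)).Pairwise (· < ·) :=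
    (List.pairwise_lt_range).filter _
  rw [pv_pairwise_iff_of_sorted hsorted]
  constructor
  · intro h i hi j hj hij hbi hbj
    have h2 := h i (by simp only [List.mem_filter, List.mem_range, hbi, and_true, hn]; omega)
      j (by simp only [List.mem_filter, List.mem_range, hbj, and_true, hn]; omega) hij
    rw [PySem.List.pyGetD_natCast, PySem.List.pyGetD_natCast] at h2
    have h3 : pvEntry
        ((pvPairsN n).foldl (pvStep cycles)
          ((List.range n).map (fun _ => List.replicate n false))) i j = false := h2
    rw [pv_adj_spec cycles i j hi hj] at h3
    simpa [show i ≠ j by omega] using h3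
  · intro h a ha b hb hab
    rw [List.mem_filter, List.mem_range] at ha hb
    rw [PySem.List.pyGetD_natCast, PySem.List.pyGetD_natCast]
    show pvEntry
        ((pvPairsN n).foldl (pvStep cycles)
          ((List.range n).map (fun _ => List.replicate n false))) a b = false
    rw [pv_adj_spec cycles a b ha.1 hb.1]
    simp [h a ha.1 b hb.1 hab (by simpa using ha.2) (by simpa using hb.2)]

-- ---- B side ----

def pvNbr (cycles : List (List Int)) (i : Nat) : Nat :=
  (List.range cycles.length).foldl
    (fun v j => if decide (j ≠ i) && pvE cycles i j then v ||| (1 <<< j) else v) 0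

theorem pv_foldl_or_testBit (c : Nat → Bool) (l : List Nat) (v b : Nat) :
    (l.foldl (fun v j => if c j then v ||| (1 <<< j) else v) v).testBit b
      = (v.testBit b || (decide (b ∈ l) && c b)) := by
  induction l generalizing v with
  | nil => simp
  | cons a l ih =>
    rw [List.foldl_cons, ih]
    by_cases hca : c a = true
    · simp only [hca, if_true, Nat.testBit_or]
      rw [Nat.shiftLeft_eq, one_mul, Nat.testBit_two_pow]
      by_cases hba : a = b
      · subst hba
        simp [hca]
      · have hba' : b ≠ a := fun h => hba h.symm
        simp [hba, hba', List.mem_cons]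
    · have hca' : c a = false := by simpa using hca
      rw [hca']
      simp only [Bool.false_eq_true, if_false]
      have h2 : (decide (b ∈ a :: l) && c b) = (decide (b ∈ l) && c b) := by
        by_cases hba : b = a
        · subst hba
          simp [hca']
        · simp [List.mem_cons, hba]
      rw [h2]

theorem pv_nbr_testBit (cycles : List (List Int)) (i b : Nat) :
    (pvNbr cycles i).testBit b
      = (decide (b < cycles.length) && decide (b ≠ i) && pvE cycles i b) := by
  unfold pvNbr
  rw [pv_foldl_or_testBit]
  simp [List.mem_range, Bool.and_assoc]

theorem pv_foldl_cast (l : List Nat) (f : Nat → Nat → Nat) (g : Int → Int → Int) (s0 : Nat)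
    (h : ∀ (s : Nat), ∀ j ∈ l, g ((s : Nat) : Int) ((j : Nat) : Int) = ((f s j : Nat) : Int)) :
    (List.map (fun (k : Nat) => (k : Int)) l).foldl g ((s0 : Nat) : Int) = ((l.foldl f s0 : Nat) : Int) := by
  induction l generalizing s0 with
  | nil => rfl
  | cons a l ih =>
    rw [List.map_cons, List.foldl_cons, List.foldl_cons, h s0 a (by simp)]
    exact ih (f s0 a) (fun s j hj => h s j (by simp [hj]))

theorem pv_nbrB_eq (cycles : List (List Int)) (i : Nat) (hi : i < cycles.length) :
    (((List.range cycles.length).map (fun (k : Nat) => (k : Int))).foldl (fun v j =>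
      if j != ((i : Nat) : Int) && pvInterNonempty
          (PySem.List.pyGetD (cycles.map (fun c => PySem.Set.ofList c)) ((i : Nat) : Int) [])
          (PySem.List.pyGetD (cycles.map (fun c => PySem.Set.ofList c)) j []) then
        PySem.Int.bor v ((1:Int) <<< j.toNat)
      else v) 0)
      = ((pvNbr cycles i : Nat) : Int) := by
  set n := cycles.length with hn
  have h0 : PySem.List.pyRange 0 (n : Int) = (List.range n).map (fun (k : Nat) => (k : Int)) := by
    have := pv_pyRange_natCast 0 n
    simpa [List.range_eq_range'] using this
  rw [show (0:Int) = ((0:Nat):Int) by norm_num]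
  unfold pvNbr
  rw [pv_foldl_cast]
  intro s j hj
  rw [List.mem_range] at hj
  rw [pv_sets_getD cycles i (by omega), pv_sets_getD cycles j (by omega)]
  have hbne : (((j : Nat) : Int) != ((i : Nat) : Int)) = decide (j ≠ i) := by
    by_cases h : j = i
    · subst h; simp
    · simp [h, fun hc : (j:Int) = (i:Int) => h (by exact_mod_cast hc)]
  rw [hbne]
  show _ = (((if decide (j ≠ i) && pvE cycles i j then s ||| 1 <<< j else s : Nat)) : Int)
  have hEdef : pvInterNonempty (PySem.Set.ofList (cycles.getD i []))
      (PySem.Set.ofList (cycles.getD j [])) = pvE cycles i j := rfl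
  rw [hEdef]
  by_cases hc : (decide (j ≠ i) && pvE cycles i j) = true
  · rw [hc, if_pos rfl, if_pos rfl]
    have h1 : ((1:Int) <<< (((j : Nat) : Int)).toNat) = (((1 <<< j : Nat) : Nat) : Int) := by
      simp
    rw [h1, PySem.Int.bor_natCast]
  · have hc' : (decide (j ≠ i) && pvE cycles i j) = false := by simpa using hc
    rw [hc']
    simp

theorem pv_bit_cond (M k : Nat) :
    ((fun (mask i : Int) => PySem.Int.band (mask >>> i.toNat) 1 != 0)
        ((M : Nat) : Int) ((k : Nat) : Int)) = M.testBit k := by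
  simp only [Int.toNat_natCast]
  first
  | rw [Int.shiftRight_natCast]
  | rw [← Int.natCast_shiftRight]
  rw [show (1 : Int) = ((1 : Nat) : Int) by norm_num, PySem.Int.band_natCast]
  rw [Bool.eq_iff_iff]
  simp only [bne_iff_ne, ne_eq, Nat.cast_eq_zero, Nat.and_one_is_mod,
    Nat.testBit_eq_decide_div_mod_eq, Nat.shiftRight_eq_div_pow, decide_eq_true_eq]
  omega

theorem pv_nbr_lookup (cycles : List (List Int)) (i : Nat) (hi : i < cycles.length) :
    PySem.List.pyGetD
      ((List.range cycles.length).map (fun i => ((pvNbr cycles i : Nat) : Int))) ((i : Nat) : Int) 0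
      = ((pvNbr cycles i : Nat) : Int) := by
  rw [PySem.List.pyGetD_natCast, List.getD_eq_getElem?_getD]
  simp [List.getElem?_map, List.getElem?_range, hi]

theorem pv_and_cond (cycles : List (List Int)) (i M : Nat) :
    (PySem.Int.band (((pvNbr cycles i : Nat)) : Int) ((M : Nat) : Int) != 0)
      = !(pvNbr cycles i &&& M == 0) := by
  rw [PySem.Int.band_natCast, Bool.eq_iff_iff]
  simp

theorem pv_scan_ok (cycles : List (List Int)) (M : Nat) (l : List Nat) (s : Int)
    (hl : ∀ j ∈ l, j < cycles.length) :
    (pvMaskScan ((List.range cycles.length).map (fun i => ((pvNbr cycles i : Nat) : Int)))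
        ((M : Nat) : Int) (l.map (fun (k : Nat) => (k : Int))) s).1
      = l.all (fun i => !(M.testBit i) || (pvNbr cycles i &&& M == 0)) := by
  revert hl
  induction l generalizing s with
  | nil => intro hl; rfl
  | cons i l ih =>
    intro hl
    have hi : i < cycles.length := hl i (by simp)
    have hbitc := pv_bit_cond M i
    simp only [] at hbitc
    rw [List.map_cons, pvMaskScan, hbitc, pv_nbr_lookup cycles i hi, pv_and_cond,
      List.all_cons]
    have ih2 := fun s => ih s (fun j hj => hl j (by simp [hj]))
    by_cases hbit : M.testBit i = true <;> by_cases hand : (pvNbr cycles i &&& M == 0) = true <;>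
      simp [hbit, hand, ih2]

theorem pv_scan_size (cycles : List (List Int)) (M : Nat) (l : List Nat) (s : Int)
    (hl : ∀ j ∈ l, j < cycles.length)
    (hok : l.all (fun i => !(M.testBit i) || (pvNbr cycles i &&& M == 0)) = true) :
    (pvMaskScan ((List.range cycles.length).map (fun i => ((pvNbr cycles i : Nat) : Int)))
        ((M : Nat) : Int) (l.map (fun (k : Nat) => (k : Int))) s).2
      = s + (((l.filter (fun i => M.testBit i)).length : Nat) : Int) := by
  revert hl hok
  induction l generalizing s with
  | nil => intro hl hok; simp [pvMaskScan]
  | cons i l ih =>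
    intro hl hok
    have hi : i < cycles.length := hl i (by simp)
    have hbitc := pv_bit_cond M i
    simp only [] at hbitc
    rw [List.all_cons] at hok
    rw [List.map_cons, pvMaskScan, hbitc, pv_nbr_lookup cycles i hi, pv_and_cond]
    have ih2 := fun s => ih s (fun j hj => hl j (by simp [hj]))
      (by simp only [Bool.and_eq_true] at hok; exact hok.2)
    by_cases hbit : M.testBit i = true
    · have hand : (pvNbr cycles i &&& M == 0) = true := by
        simp only [Bool.and_eq_true] at hok
        have := hok.1
        rw [hbit] at this
        simpa using this
      rw [hbit, hand]
      simp [ih2, List.filter_cons, hbit]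
      push_cast
      ring
    · have hbit' : M.testBit i = false := by simpa using hbit
      rw [hbit']
      simp [ih2, List.filter_cons, hbit']

theorem pv_and_eq_zero (a b : Nat) :
    a &&& b = 0 ↔ ∀ i, ¬(a.testBit i ∧ b.testBit i) := by
  constructor
  · intro h i hi
    have := Nat.testBit_and a b i
    rw [h, Nat.zero_testBit, hi.1, hi.2] at this
    simp at this
  · intro h
    by_contra h0
    obtain ⟨b0, hb0⟩ := Nat.exists_testBit_of_ne_zero h0
    rw [Nat.testBit_and, Bool.and_eq_true] at hb0
    exact h b0 ⟨hb0.1, hb0.2⟩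

theorem pv_indepB (cycles : List (List Int)) (M : Nat) :
    (List.range cycles.length).all
        (fun i => !(M.testBit i) || (pvNbr cycles i &&& M == 0))
      = pvIndepB cycles M := by
  unfold pvIndepB
  rw [Bool.eq_iff_iff]
  simp only [List.all_eq_true, List.mem_range, Bool.or_eq_true, Bool.not_eq_eq_eq_not,
    Bool.not_true, beq_iff_eq, decide_eq_true_eq]
  constructor
  · intro h i hi j hj hij hbi hbj
    rcases h i hi with hb | hz
    · rw [hbi] at hb; simp at hb
    · by_contra hne
      have hE : pvE cycles i j = true := by
        cases hEv : pvE cycles i j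
        · exact absurd hEv hne
        · rfl
      have := (pv_and_eq_zero _ _).1 hz j
      rw [pv_nbr_testBit] at this
      exact this ⟨by simp [hj, hE, show j ≠ i by omega], hbj⟩
  · intro h i hi
    by_cases hbi : M.testBit i = true
    · right
      rw [pv_and_eq_zero]
      intro b hb
      rw [pv_nbr_testBit] at hb
      obtain ⟨hb1, hb2⟩ := hb
      simp only [Bool.and_eq_true, decide_eq_true_eq] at hb1
      obtain ⟨⟨hbn, hbnei⟩, hEib⟩ := hb1
      rcases Nat.lt_or_ge i b with hord | hord
      · have := h i hi b hbn hord hbi hb2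
        rw [this] at hEib
        simp at hEib
      · have hbi' : b < i := by omega
        have := h b hbn i hi hbi' hb2 hbi
        rw [pvE_comm] at hEib
        rw [this] at hEib
        simp at hEib
    · left
      simpa using hbi

def pvSize (n M : Nat) : Nat := ((List.range n).filter (fun i => M.testBit i)).length

def pvMasks (cycles : List (List Int)) : List Nat :=
  (List.range (2 ^ cycles.length)).filter (fun M => pvIndepB cycles M)

def pvSizesN (cycles : List (List Int)) : List Nat :=
  (pvMasks cycles).map (pvSize cycles.length)

def pvSizes (cycles : List (List Int)) : List Int :=
  (pvSizesN cycles).map (fun (k : Nat) => (k : Int))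

def pvCnt (cycles : List (List Int)) (k : Nat) : Nat := (pvSizesN cycles).count k

def pvK (cycles : List (List Int)) : Nat := (pvSizesN cycles).foldl max 0

theorem pv_size_le (n M : Nat) : pvSize n M ≤ n := by
  unfold pvSize
  calc ((List.range n).filter (fun i => M.testBit i)).length ≤ (List.range n).length :=
        List.length_filter_le _ _
    _ = n := List.length_range

theorem pv_zero_mem_masks (cycles : List (List Int)) : 0 ∈ pvMasks cycles := by
  unfold pvMasks
  rw [List.mem_filter, List.mem_range]
  refine ⟨Nat.two_pow_pos _, ?_⟩
  unfold pvIndepB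
  simp only [decide_eq_true_eq]
  intro i _ j _ _ hbi
  simp [Nat.zero_testBit] at hbi

theorem pv_foldl_max_le (l : List Nat) (a : Nat) : ∀ x ∈ l, x ≤ l.foldl max a := by
  induction l generalizing a with
  | nil => simp
  | cons b l ih =>
    intro x hx
    rcases List.mem_cons.1 hx with rfl | hx
    · calc x ≤ max a x := le_max_right _ _
        _ ≤ l.foldl max (max a x) := by
            clear ih hx
            induction l generalizing a x with
            | nil => simp
            | cons c l ih2 => exact le_trans (le_max_left _ c) (ih2 _ _)
    · exact ih (max a b) x hx

theorem pv_foldl_max_mem (l : List Nat) (a : Nat) : l.foldl max a = a ∨ l.foldl max a ∈ l := by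
  induction l generalizing a with
  | nil => simp
  | cons b l ih =>
    rcases ih (max a b) with h | h
    · rcases Nat.le_total a b with hab | hab
      · right
        rw [List.foldl_cons, h]
        simp [Nat.max_eq_right hab]
      · left
        rw [List.foldl_cons, h]
        simp [Nat.max_eq_left hab]
    · right
      rw [List.foldl_cons]
      exact List.mem_cons_of_mem _ h

theorem pv_K_spec (cycles : List (List Int)) :
    pvK cycles ∈ pvSizesN cycles ∧ ∀ y ∈ pvSizesN cycles, y ≤ pvK cycles := by
  constructor
  · rcases pv_foldl_max_mem (pvSizesN cycles) 0 with h | h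
    · unfold pvK
      rw [h]
      have h0 : pvSize cycles.length 0 = 0 := by
        unfold pvSize
        rw [List.filter_eq_nil_iff.2 (by intro k _; simp [Nat.zero_testBit])]
        rfl
      have : (0:Nat) ∈ pvSizesN cycles := by
        unfold pvSizesN
        rw [← h0]
        exact List.mem_map_of_mem (pv_zero_mem_masks cycles)
      exact this
    · exact h
  · exact pv_foldl_max_le _ _

theorem pv_trim_map_range (g : Nat → Int) (N K : Nat) (hK : K ≤ N)
    (hg : ∀ j, K < j → j ≤ N → g j = 0) (hgK : g K ≠ 0 ∨ K = 0) :
    pvTrim ((List.range (N+1)).map g) = (List.range (K+1)).map g := by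
  induction N with
  | zero =>
    have hK0 : K = 0 := by omega
    subst hK0
    rw [pvTrim]
    simp
  | succ N ih =>
    have hsplit : (List.range (N+1+1)).map g = (List.range (N+1)).map g ++ [g (N+1)] := by
      rw [List.range_succ, List.map_append]
      rfl
    rcases Nat.eq_or_lt_of_le hK with hKN | hKN
    · subst hKN
      rw [pvTrim]
      rw [dif_neg]
      rw [hsplit, PySem.List.pyGetD_neg_one_append_singleton]
      rcases hgK with h | h
      · intro hc
        exact h hc.2
      · exact absurd h (by omega)
    · have hlast : g (N+1) = 0 := hg (N+1) (by omega) (by omega)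
      rw [pvTrim, dif_pos]
      · rw [hsplit, List.dropLast_concat]
        exact ih (by omega) (fun j h1 h2 => hg j h1 (by omega))
      · constructor
        · simp
        · rw [hsplit, PySem.List.pyGetD_neg_one_append_singleton, hlast]

theorem pv_h2n (n : Nat) : PySem.List.pyRange 0 ((2:Int)^n)
    = (List.range (2^n)).map (fun (k : Nat) => (k : Int)) := by
  rw [show ((2:Int)^n) = ((2^n : Nat) : Int) by push_cast; ring]
  have := pv_pyRange_natCast 0 (2^n)
  simpa [List.range_eq_range'] using this

theorem pv_max?_eq (cycles : List (List Int)) :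
    (PySem.List.max? (PySem.Set.ofList (pvSizes cycles)) (fun k => k)).getD 0
      = ((pvK cycles : Nat) : Int) := by
  obtain ⟨hKmem, hKmax⟩ := pv_K_spec cycles
  have hne : PySem.Set.ofList (pvSizes cycles) ≠ [] := by
    intro h
    have : ((pvK cycles : Nat) : Int) ∈ PySem.Set.ofList (pvSizes cycles) := by
      rw [PySem.Set.mem_ofList]
      exact List.mem_map_of_mem hKmem
    rw [h] at this
    simp at this
  cases hv : PySem.List.max? (PySem.Set.ofList (pvSizes cycles)) (fun k => k) with
  | none => exact absurd ((PySem.List.max?_eq_none_iff _ _).1 hv) hne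
  | some v =>
  rw [Option.getD_some]
  have hvmem : v ∈ pvSizes cycles := by
    have := PySem.List.max?_mem hv
    rwa [PySem.Set.mem_ofList] at this
  have hvmax : ∀ y ∈ pvSizes cycles, y ≤ v := by
    intro y hy
    exact PySem.List.max?_isMax hv y (by rw [PySem.Set.mem_ofList]; exact hy)
  obtain ⟨k0, hk0, rfl⟩ := List.mem_map.1 hvmem
  have h1 : k0 ≤ pvK cycles := hKmax k0 hk0
  have h2 : ((pvK cycles : Nat) : Int) ≤ k0 := hvmax _ (List.mem_map_of_mem hKmem)
  have : pvK cycles ≤ k0 := by exact_mod_cast h2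
  have : k0 = pvK cycles := by omega
  rw [this]

theorem pv_sizes_ofList_ne_nil (cycles : List (List Int)) :
    PySem.Set.ofList (pvSizes cycles) ≠ [] := by
  intro h
  have hmem : ((pvK cycles : Nat) : Int) ∈ PySem.Set.ofList (pvSizes cycles) := by
    rw [PySem.Set.mem_ofList]
    exact List.mem_map_of_mem (pv_K_spec cycles).1
  rw [h] at hmem
  simp at hmem

theorem pv_A_eq (cycles : List (List Int)) :
    independence_polynomial_coeffs cycles
      = (List.range (pvK cycles + 1)).map (fun k => ((pvCnt cycles k : Nat) : Int)) := by
  unfold independence_polynomial_coeffs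
  simp only [pv_adjA_eq, pv_h2n, List.foldl_map]
  rw [PySem.List.foldl_congr_mem _ _
    (fun (alpha : PySem.Dict Int Int) (M : Nat) =>
      if pvIndepB cycles M then
        alpha.modify ((pvSize cycles.length M : Nat) : Int) 0 (· + 1) else alpha) _
    (by
      intro acc M hM
      rw [pv_vertsA cycles _ M rfl, pv_indepA, List.length_map]
      rfl)]
  rw [← List.foldl_filter]
  rw [show ((List.range (2 ^ cycles.length)).filter (fun M => pvIndepB cycles M))
      = pvMasks cycles from rfl]
  have hfold : ((pvMasks cycles).foldl
      (fun (d : PySem.Dict Int Int) M => d.modify ((pvSize cycles.length M : Nat) : Int) 0 (· + 1))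
      PySem.Dict.empty) = PySem.Dict.counter (pvSizes cycles) := by
    rw [PySem.Dict.counter_eq_foldl]
    unfold pvSizes pvSizesN
    rw [List.foldl_map, List.foldl_map]
  rw [hfold]
  have hsz : (PySem.Dict.counter (pvSizes cycles)).size ≠ 0 := by
    intro h0
    apply pv_sizes_ofList_ne_nil cycles
    have h1 : (PySem.Dict.counter (pvSizes cycles)).keys.length = 0 := by
      simp only [PySem.Dict.keys, PySem.Dict.size] at h0 ⊢
      simpa using h0
    rw [PySem.Dict.keys_counter] at h1
    exact List.eq_nil_of_length_eq_zero h1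
  rw [if_pos hsz, PySem.Dict.keys_counter, pv_max?_eq]
  rw [show ((pvK cycles : Nat) : Int) + 1 = ((pvK cycles + 1 : Nat) : Int) by push_cast; ring]
  have h0 : PySem.List.pyRange 0 ((pvK cycles + 1 : Nat) : Int)
      = (List.range (pvK cycles + 1)).map (fun (k : Nat) => (k : Int)) := by
    have := pv_pyRange_natCast 0 (pvK cycles + 1)
    simpa [List.range_eq_range'] using this
  rw [h0, List.map_map]
  apply List.map_congr_left
  intro k _
  simp only [Function.comp_apply]
  rw [PySem.Dict.getD_counter]
  unfold pvSizes
  rw [List.count_map_of_injective _ _ (fun a b h => by exact_mod_cast h) k]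
  rfl

theorem pv_K_le (cycles : List (List Int)) : pvK cycles ≤ cycles.length := by
  obtain ⟨hmem, -⟩ := pv_K_spec cycles
  obtain ⟨M, -, h⟩ := List.mem_map.1 hmem
  rw [← h]
  exact pv_size_le _ _

theorem pv_set_map_range (k N : Nat) (g : Nat → Int) (v : Int) (h : k < N) :
    ((List.range N).map g).set k v = (List.range N).map (fun j => if j = k then v else g j) := by
  apply List.ext_getElem (by simp)
  intro i hi1 hi2
  simp only [List.getElem_set, List.getElem_map, List.getElem_range]
  simp only [List.length_map, List.length_range] at hi1
  by_cases hik : i = k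
  · simp [hik]
  · simp [hik, Ne.symm hik]

theorem pv_counts_fold0 (n : Nat) (ks : List Nat) (hks : ∀ k ∈ ks, k < n + 1) (g : Nat → Int) :
    ks.foldl (fun counts k => counts.set k (counts.getD k 0 + 1)) ((List.range (n+1)).map g)
      = (List.range (n+1)).map (fun k => g k + (ks.count k : Int)) := by
  induction ks generalizing g with
  | nil => simp
  | cons k ks ih =>
    have hk : k < n + 1 := hks k (by simp)
    have hget : ((List.range (n+1)).map g).getD k 0 = g k := by
      rw [List.getD_eq_getElem?_getD]
      simp [List.getElem?_map, List.getElem?_range, hk]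
    simp only [List.foldl_cons, hget, pv_set_map_range k (n+1) g _ hk]
    rw [ih (fun j hj => hks j (by simp [hj]))]
    apply List.map_congr_left
    intro j hj
    by_cases hjk : j = k
    · subst hjk; simp [List.count_cons_self]; ring
    · simp [hjk, List.count_cons]
      omega


theorem pv_B_eq (cycles : List (List Int)) :
    independence_polynomial_coeffs_alt cycles
      = (List.range (pvK cycles + 1)).map (fun k => ((pvCnt cycles k : Nat) : Int)) := by
  unfold independence_polynomial_coeffs_alt
  have h0 : PySem.List.pyRange 0 ((cycles.length : Nat) : Int)
      = (List.range cycles.length).map (fun (k : Nat) => (k : Int)) := by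
    have := pv_pyRange_natCast 0 cycles.length
    simpa [List.range_eq_range'] using this
  have hnbr : ((PySem.List.pyRange 0 ((cycles.length : Nat) : Int)).map (fun i =>
      (PySem.List.pyRange 0 ((cycles.length : Nat) : Int)).foldl (fun v j =>
        if j != i && pvInterNonempty
            (PySem.List.pyGetD (cycles.map (fun c => PySem.Set.ofList c)) i [])
            (PySem.List.pyGetD (cycles.map (fun c => PySem.Set.ofList c)) j []) then
          PySem.Int.bor v ((1:Int) <<< j.toNat)
        else v) 0))
      = (List.range cycles.length).map (fun i => ((pvNbr cycles i : Nat) : Int)) := by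
    rw [h0, List.map_map]
    apply List.map_congr_left
    intro i hi
    rw [List.mem_range] at hi
    simp only [Function.comp_apply]
    exact pv_nbrB_eq cycles i hi
  simp only [hnbr, pv_h2n, List.foldl_map]
  rw [PySem.List.foldl_congr_mem _ _
    (fun (counts : List Int) (M : Nat) =>
      if pvIndepB cycles M then
        counts.set (pvSize cycles.length M)
          (counts.getD (pvSize cycles.length M) 0 + 1) else counts) _
    (by
      intro acc M hM
      have hok := pv_scan_ok cycles M (List.range cycles.length) 0
        (by intro j hj; rw [List.mem_range] at hj; omega)
      rw [pv_indepB] at hok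
      have hl : ∀ j ∈ List.range cycles.length, j < cycles.length := by
        intro j hj; rw [List.mem_range] at hj; omega
      by_cases hind : pvIndepP cycles M
      · have hok1 : (pvMaskScan
            ((List.range cycles.length).map (fun i => ((pvNbr cycles i : Nat) : Int)))
            ((M : Nat) : Int)
            ((List.range cycles.length).map (fun (k : Nat) => (k : Int))) 0).1 = true := by
          rw [hok]; simpa [pvIndepB] using hind
        have hsz := pv_scan_size cycles M (List.range cycles.length) 0 hl
          (by rw [pv_indepB]; simpa [pvIndepB] using hind)
        rw [h0, hok1, if_pos rfl, hsz]
        rw [show ((0:Int) + ((((List.range cycles.length).filter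
              (fun i => M.testBit i)).length : Nat) : Int))
            = ((pvSize cycles.length M : Nat) : Int) by rw [zero_add]; rfl]
        rw [PySem.List.pySetD_natCast, PySem.List.pyGetD_natCast]
        have hb : pvIndepB cycles M = true := by unfold pvIndepB; exact decide_eq_true hind
        simp [hb]
      · have hok0 : (pvMaskScan
            ((List.range cycles.length).map (fun i => ((pvNbr cycles i : Nat) : Int)))
            ((M : Nat) : Int)
            ((List.range cycles.length).map (fun (k : Nat) => (k : Int))) 0).1 = false := by
          rw [hok]; simpa [pvIndepB] using hind
        rw [h0, hok0]
        rw [if_neg (by simp)]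
        have hb : pvIndepB cycles M = false := by unfold pvIndepB; simpa using hind
        simp [hb])]
  rw [← List.foldl_filter]
  rw [show ((List.range (2 ^ cycles.length)).filter (fun M => pvIndepB cycles M))
      = pvMasks cycles from rfl]
  have hinit : List.replicate (cycles.length + 1) (0:Int)
      = (List.range (cycles.length + 1)).map (fun _ => (0:Int)) := by
    rw [List.map_const']
    simp
  have hfold : (pvSizesN cycles).foldl
        (fun (c : List Int) k => c.set k (c.getD k 0 + 1))
        ((List.range (cycles.length + 1)).map (fun _ => (0:Int)))
      = (pvMasks cycles).foldl
        (fun (c : List Int) M =>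
          c.set (pvSize cycles.length M) (c.getD (pvSize cycles.length M) 0 + 1))
        ((List.range (cycles.length + 1)).map (fun _ => (0:Int))) := by
    unfold pvSizesN
    rw [List.foldl_map]
  rw [hinit, ← hfold]
  rw [pv_counts_fold0 cycles.length (pvSizesN cycles)
    (by
      intro k hk
      obtain ⟨M, -, h⟩ := List.mem_map.1 hk
      have := pv_size_le cycles.length M
      omega)
    (fun _ => (0:Int))]
  rw [show ((List.range (cycles.length + 1)).map
        (fun k => (0:Int) + ((pvSizesN cycles).count k : Int)))
      = (List.range (cycles.length + 1)).map (fun k => ((pvCnt cycles k : Nat) : Int)) by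
    apply List.map_congr_left
    intro k _
    rw [zero_add]
    rfl]
  rw [pv_trim_map_range (fun k => ((pvCnt cycles k : Nat) : Int)) cycles.length (pvK cycles)
    (pv_K_le cycles)
    (by
      intro j h1 h2
      have hnotmem : j ∉ pvSizesN cycles := by
        intro hmem
        have := (pv_K_spec cycles).2 j hmem
        omega
      simp only [Nat.cast_eq_zero]
      unfold pvCnt
      exact List.count_eq_zero.2 hnotmem)
    (Or.inl (by
      have hpos : 0 < pvCnt cycles (pvK cycles) := by
        unfold pvCnt
        exact List.count_pos_iff.2 (pv_K_spec cycles).1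
      simp only [ne_eq, Nat.cast_eq_zero]
      omega))]

-- ===== VERDICT (by name: the statement is the Claim_ definition above) =====
theorem independence_polynomial_coeffs_spec : Claim_equal_independence_polynomial_coeffs := by
  intro cycles _
  unfold Spec_independence_polynomial_coeffs
  rw [pv_A_eq, pv_B_eq]
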